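-- pv_equiv track=rewrite | github.com/SerSurguchev/YandexContextTasks | PrefixSum/Stylish_Clothes.py | clothes
-- ===== SOURCE A (Python) =====
-- def clothes(undershort, shorts):
--     i = j = 0
--     best_i = 0
--     best_j = 0
--     best_diff = float('inf')
--
--     while i < len(undershort) and j < len(shorts):
--         diff = abs(undershort[i] - shorts[j])
--         if diff == 0:
--             return [undershort[i], shorts[j]]
--
--         elif diff < best_diff:
--             best_diff = diff
--             best_i = i
--             best_j = j
--
--         if undershort[i] <= shorts[j]:
--             i += 1
--         else:
--             j += 1
--     return [undershort[best_i], shorts[best_j]]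
-- ===== SOURCE B (Python) =====
-- def clothes(undershort, shorts):
--     # Group-by-run reformulation: instead of one flat pointer walk with a
--     # running best, cut the undershort array into the maximal runs that each
--     # shorts value absorbs (run = prefix of remaining undershorts <= sj, plus
--     # the blocking element), pick each run's closest element with min(), and
--     # finally take the closest of the per-run candidate pairs (min with key
--     # keeps the first minimum, matching the strict-'<' semantics).
--     n = len(undershort)
--     candidates = []
--     i = 0
--     for sj in shorts:
--         if i >= n:
--             break
--         k = i
--         while k < n and undershort[k] <= sj:
--             k += 1
--         run = undershort[i:min(k + 1, n)]
--         v = min(run, key=lambda x: abs(x - sj))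
--         candidates.append((v, sj))
--         i = k
--     v, sj = min(candidates, key=lambda c: abs(c[0] - c[1]))
--     return [v, sj]
-- ===== Notes on version B (the rewrite author's own statement) =====
-- stated objective: alternative
-- what changed: B replaces A's flat two-pointer walk with a running best/early return by a group-by-run decomposition: it cuts undershort into the maximal runs each shorts value absorbs (run boundary found by a plain scan), picks each run's closest element with min(key=...), and then takes the closest of the per-run candidate pairs with a second min (min's first-minimum rule reproduces the strict-'<' tie-breaking).
import Mathlib
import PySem

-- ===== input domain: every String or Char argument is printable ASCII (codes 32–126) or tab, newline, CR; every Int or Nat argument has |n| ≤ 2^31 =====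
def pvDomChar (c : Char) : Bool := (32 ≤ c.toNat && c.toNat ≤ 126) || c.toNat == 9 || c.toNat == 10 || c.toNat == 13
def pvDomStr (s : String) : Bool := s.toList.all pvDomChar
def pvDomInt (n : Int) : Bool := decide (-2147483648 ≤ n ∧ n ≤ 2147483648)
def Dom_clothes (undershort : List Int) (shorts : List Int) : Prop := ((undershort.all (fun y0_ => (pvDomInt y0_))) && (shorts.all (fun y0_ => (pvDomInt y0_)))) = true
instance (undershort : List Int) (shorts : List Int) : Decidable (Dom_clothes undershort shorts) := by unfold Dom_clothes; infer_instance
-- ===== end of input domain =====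

-- B regroups A's flat two-pointer scan: it cuts undershort into the maximal runs each shorts value
-- absorbs, takes a min per run, then a min over the per-run candidates (objective: alternative).

-- ===== PORT A =====
-- Literal port of A's while loop. best_diff = float('inf') is modelled as `none`;
-- list indexing uses getD: inside the loop the indices are in range, and the final
-- u[best_i]/s[best_j] is in range whenever Pre_clothes holds (empty lists, on which
-- Python raises IndexError, are excluded by Pre_clothes).
def clothesLoop (u s : List Int) (i j bi bj : Nat) (bd : Option Int) : List Int :=
  if _h : i < u.length ∧ j < s.length then
    let diff := |u.getD i 0 - s.getD j 0|
    if diff = 0 then [u.getD i 0, s.getD j 0]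
    else
      let upd : Bool := match bd with | none => true | some d => decide (diff < d)
      let bi' := if upd then i else bi
      let bj' := if upd then j else bj
      let bd' := if upd then some diff else bd
      if u.getD i 0 ≤ s.getD j 0 then clothesLoop u s (i+1) j bi' bj' bd'
      else clothesLoop u s i (j+1) bi' bj' bd'
  else [u.getD bi 0, s.getD bj 0]
termination_by (u.length - i) + (s.length - j)
decreasing_by all_goals omega

def clothes (undershort : List Int) (shorts : List Int) : List Int :=
  clothesLoop undershort shorts 0 0 0 0 none

-- ===== PORT B =====
-- Source B's inner `while k < n and undershort[k] <= sj: k += 1`: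
def runEnd (u : List Int) (sj : Int) (k : Nat) : Nat :=
  if _h : k < u.length ∧ u.getD k 0 ≤ sj then runEnd u sj (k+1) else k
termination_by u.length - k
decreasing_by omega

-- Source B's outer `for sj in shorts` loop (break when i >= n), collecting the per-run
-- candidate pairs. `min(run, key=...)` is ported as PySem.List.min? (first minimal);
-- the run is nonempty whenever i < len u, so the `none` arm (Python min raising on
-- an empty sequence) is unreachable there.
def bLoop (u : List Int) (ss : List Int) (i : Nat) (acc : List (Int × Int)) : List (Int × Int) :=
  match ss with
  | [] => acc
  | sj :: rest =>
    if i < u.length then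
      let k := runEnd u sj i
      let run := PySem.List.slice u (some (i : Int)) (some ((min (k+1) u.length : Nat) : Int))
      match PySem.List.min? run (fun x => |x - sj|) with
      | some v => bLoop u rest k (acc ++ [(v, sj)])
      | none => acc
    else acc

-- Source B's final `min(candidates, key=...)`: Python min raises ValueError on an empty
-- candidate list (only when a list is empty — excluded by Pre_clothes); the port returns [] there.
def clothes_alt (undershort : List Int) (shorts : List Int) : List Int :=
  match PySem.List.min? (bLoop undershort shorts 0 []) (fun c => |c.1 - c.2|) with
  | some (v, sj) => [v, sj]
  | none => []

-- ===== PRECONDITION & SPEC =====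
-- Pre_ excludes exactly the inputs with an empty list, on which A raises IndexError
-- (and B's min raises ValueError).
def Pre_clothes (undershort : List Int) (shorts : List Int) : Prop :=
  undershort ≠ [] ∧ shorts ≠ []
instance (undershort : List Int) (shorts : List Int) : Decidable (Pre_clothes undershort shorts) := by
  unfold Pre_clothes; infer_instance
def pvWitness_clothes : List Int × List Int := ([3, 7], [5])

def Spec_clothes (undershort : List Int) (shorts : List Int) (out : List Int) : Prop := out = clothes_alt undershort shorts
instance (undershort : List Int) (shorts : List Int) (out : List Int) : Decidable (Spec_clothes undershort shorts out) := by unfold Spec_clothes; infer_instance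

-- ===== CLAIM (what is proved, stated in full; the proofs are below) =====
def Claim_equal_clothes : Prop := ∀ (undershort : List Int) (shorts : List Int), Dom_clothes undershort shorts → Pre_clothes undershort shorts → Spec_clothes undershort shorts (clothes undershort shorts)

-- ===== LEMMAS AND PROOFS =====

-- value-pair key/step/selection: the "first minimal with strict '<'" dynamics both programs share
def wKey (c : Int × Int) : Int := |c.1 - c.2|
def wStep (b y : Int × Int) : Int × Int := if wKey y < wKey b then y else b
def wSel (c : Int × Int) : List Int := [c.1, c.2]

-- index-pair versions, matching A's loop state
def pvKey (u s : List Int) (p : Nat × Nat) : Int := |u.getD p.1 0 - s.getD p.2 0|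
def pvStep (u s : List Int) (b y : Nat × Nat) : Nat × Nat :=
  if pvKey u s y < pvKey u s b then y else b
def pvSel (u s : List Int) (p : Nat × Nat) : List Int := [u.getD p.1 0, s.getD p.2 0]
def vp (u s : List Int) (p : Nat × Nat) : Int × Int := (u.getD p.1 0, s.getD p.2 0)

-- the sequence of index pairs A's two-pointer walk compares
def pvPath (u s : List Int) (i j : Nat) : List (Nat × Nat) :=
  if _h : i < u.length ∧ j < s.length then
    (i, j) :: (if u.getD i 0 ≤ s.getD j 0 then pvPath u s (i+1) j else pvPath u s i (j+1))
  else []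
termination_by (u.length - i) + (s.length - j)
decreasing_by all_goals omega

-- B's candidate list, index-style (bLoop without its accumulator)
def bCands (u s : List Int) (i j : Nat) : List (Int × Int) :=
  if _h : i < u.length ∧ j < s.length then
    let sj := s.getD j 0
    let k := runEnd u sj i
    match PySem.List.min? ((u.drop i).take (min (k+1) u.length - i)) (fun x => |x - sj|) with
    | some v => (v, sj) :: bCands u s k (j+1)
    | none => []
  else []
termination_by s.length - j
decreasing_by omega

-- the index pairs A compares against s[j] before j advances
def runPairs (u s : List Int) (i j : Nat) : List (Nat × Nat) :=
  (List.range' i (min (runEnd u (s.getD j 0) i + 1) u.length - i)).map (fun t => (t, j))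

theorem runEnd_ge (u : List Int) (sj : Int) (k : Nat) : k ≤ runEnd u sj k := by
  induction k using runEnd.induct (u := u) (sj := sj) with
  | case1 k h ih => rw [runEnd, dif_pos h]; omega
  | case2 k h => rw [runEnd, dif_neg h]

theorem runEnd_le (u : List Int) (sj : Int) (k : Nat) : k ≤ u.length →
    runEnd u sj k ≤ u.length := by
  induction k using runEnd.induct (u := u) (sj := sj) with
  | case1 k h' ih => intro _; rw [runEnd, dif_pos h']; exact ih (by omega)
  | case2 k h' => intro h; rw [runEnd, dif_neg h']; exact h

theorem wStep_self (b : Int × Int) : wStep b b = b := by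
  simp [wStep]

theorem wStep_assoc (b y z : Int × Int) :
    wStep (wStep b y) z = wStep b (wStep y z) := by
  unfold wStep
  by_cases h1 : wKey y < wKey b <;> by_cases h2 : wKey z < wKey y <;>
    simp only [h1, h2, if_false, if_pos] <;> split_ifs <;>
    first | rfl | (exfalso; omega)

theorem foldl_wStep_cons (zs : List (Int × Int)) : ∀ (c z : Int × Int),
    List.foldl wStep c (z :: zs) = wStep c (List.foldl wStep z zs) := by
  induction zs with
  | nil => intro c z; rfl
  | cons w ws ih =>
      intro c z
      have h1 : List.foldl wStep c (z :: w :: ws) = List.foldl wStep (wStep c z) (w :: ws) := rfl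
      rw [h1, ih (wStep c z) w, wStep_assoc, ← ih z w]

theorem foldl_wStep_lt_or_eq (l : List (Int × Int)) : ∀ c,
    List.foldl wStep c l = c ∨ wKey (List.foldl wStep c l) < wKey c := by
  induction l with
  | nil => intro c; exact Or.inl rfl
  | cons y ys ih =>
      intro c
      simp only [List.foldl_cons]
      by_cases h : wKey y < wKey c
      · rw [show wStep c y = y from if_pos h]
        rcases ih y with h' | h'
        · rw [h']; exact Or.inr h
        · exact Or.inr (by omega)
      · rw [show wStep c y = c from if_neg h]
        exact ih c

-- Python min with a key returns the FIRST minimal element: as a strict-'<' fold from the head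
theorem min?_cons_foldl {α : Type} (k : α → Int) (x : α) (xs : List α) :
    PySem.List.min? (x :: xs) k
      = some (List.foldl (fun b y => if k y < k b then y else b) x xs) := by
  simp only [PySem.List.min?, List.foldl_cons]
  induction xs generalizing x with
  | nil => rfl
  | cons y ys ih =>
      simp only [List.foldl_cons]
      by_cases h : k y < k x <;> simp [h, ih]

-- fold over the pairs (t, sj) is the fold over the t's, paired with sj
theorem foldl_wStep_snd (sj : Int) (xs : List Int) : ∀ x,
    List.foldl wStep (x, sj) (xs.map (fun t => (t, sj)))
      = (List.foldl (fun b y => if |y - sj| < |b - sj| then y else b) x xs, sj) := by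
  induction xs with
  | nil => intro x; rfl
  | cons y ys ih =>
      intro x
      simp only [List.map_cons, List.foldl_cons]
      rw [show wStep (x, sj) (y, sj) = (if |y - sj| < |x - sj| then y else x, sj) by
            unfold wStep wKey; split_ifs <;> rfl]
      by_cases h : |y - sj| < |x - sj|
      · rw [if_pos h, ih y]
      · rw [if_neg h, ih x]

theorem vp_pvStep (u s : List Int) (b y : Nat × Nat) :
    vp u s (pvStep u s b y) = wStep (vp u s b) (vp u s y) := by
  unfold pvStep wStep
  have hb : pvKey u s b = wKey (vp u s b) := rfl
  have hy : pvKey u s y = wKey (vp u s y) := rfl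
  rw [hb, hy]; split_ifs <;> rfl

theorem vp_foldl (u s : List Int) (l : List (Nat × Nat)) : ∀ b,
    vp u s (List.foldl (pvStep u s) b l) = List.foldl wStep (vp u s b) (l.map (vp u s)) := by
  induction l with
  | nil => intro b; rfl
  | cons y ys ih =>
      intro b
      simp only [List.map_cons, List.foldl_cons, ih (pvStep u s b y), vp_pvStep]

theorem key_nonneg (u s : List Int) (p : Nat × Nat) : 0 ≤ pvKey u s p := abs_nonneg _

theorem foldl_step_zero (u s : List Int) (b : Nat × Nat) (hb : pvKey u s b = 0) :
    ∀ ps, List.foldl (pvStep u s) b ps = b := by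
  intro ps
  induction ps with
  | nil => rfl
  | cons y ys ih =>
      have : ¬ pvKey u s y < pvKey u s b := by
        have := key_nonneg u s y; omega
      simp [List.foldl_cons, pvStep, this, ih]

-- A's loop, once a best is recorded, is the strict-'<' fold over the remaining path
theorem loop_eq_fold (u s : List Int) : ∀ n i j (p : Nat × Nat),
    (u.length - i) + (s.length - j) ≤ n → 0 < pvKey u s p →
    clothesLoop u s i j p.1 p.2 (some (pvKey u s p))
      = pvSel u s (List.foldl (pvStep u s) p (pvPath u s i j)) := by
  intro n
  induction n with
  | zero =>
      intro i j p h _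
      have hc : ¬ (i < u.length ∧ j < s.length) := by omega
      rw [clothesLoop, pvPath, dif_neg hc, dif_neg hc]
      rfl
  | succ n ih =>
      intro i j p h hp
      by_cases hc : i < u.length ∧ j < s.length
      · rw [clothesLoop, pvPath, dif_pos hc, dif_pos hc]
        simp only []
        set diff := |u.getD i 0 - s.getD j 0| with hdiff
        have hkij : pvKey u s (i, j) = diff := rfl
        by_cases hz : diff = 0
        · rw [if_pos hz, List.foldl_cons]
          have hstep : pvStep u s p (i, j) = (i, j) := by
            simp [pvStep, hkij, hz, hp]
          rw [hstep, foldl_step_zero u s (i, j) (by rw [hkij, hz])]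
          rfl
        · rw [if_neg hz, List.foldl_cons]
          by_cases hlt : diff < pvKey u s p
          · have hstep : pvStep u s p (i, j) = (i, j) := by simp [pvStep, hkij, hlt]
            rw [hstep]
            simp only [hlt, decide_true, if_true]
            have hdpos : 0 < pvKey u s (i, j) := by
              have := key_nonneg u s (i, j); rw [hkij] at this ⊢; omega
            by_cases hle : u.getD i 0 ≤ s.getD j 0
            · rw [if_pos hle, if_pos hle]
              have := ih (i+1) j (i, j) (by omega) hdpos
              rw [hkij] at this; exact this
            · rw [if_neg hle, if_neg hle]
              have := ih i (j+1) (i, j) (by omega) hdpos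
              rw [hkij] at this; exact this
          · have hstep : pvStep u s p (i, j) = p := by simp [pvStep, hkij, hlt]
            rw [hstep]
            simp only [hlt, decide_false]
            by_cases hle : u.getD i 0 ≤ s.getD j 0
            · rw [if_pos hle, if_pos hle]
              exact ih (i+1) j p (by omega) hp
            · rw [if_neg hle, if_neg hle]
              exact ih i (j+1) p (by omega) hp
      · rw [clothesLoop, pvPath, dif_neg hc, dif_neg hc]
        rfl

theorem pvStep_self (u s : List Int) (p : Nat × Nat) : pvStep u s p p = p := by
  simp [pvStep]

-- A returns the selection of the first minimal pair along its comparison path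
theorem A_char (u s : List Int) (hu : u ≠ []) (hs : s ≠ []) :
    clothes u s = pvSel u s (List.foldl (pvStep u s) (0, 0) (pvPath u s 0 0)) := by
  have hc : 0 < u.length ∧ 0 < s.length :=
    ⟨List.length_pos_iff.mpr hu, List.length_pos_iff.mpr hs⟩
  unfold clothes
  rw [clothesLoop, pvPath, dif_pos hc, dif_pos hc]
  simp only []
  set diff := |u.getD 0 0 - s.getD 0 0| with hdiff
  have hk00 : pvKey u s (0, 0) = diff := rfl
  rw [List.foldl_cons, pvStep_self]
  by_cases hz : diff = 0
  · rw [if_pos hz, foldl_step_zero u s (0, 0) (by rw [hk00, hz])]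
    rfl
  · rw [if_neg hz]
    have hdpos : 0 < pvKey u s (0, 0) := by
      have := key_nonneg u s (0, 0); rw [hk00] at this ⊢; omega
    by_cases hle : u.getD 0 0 ≤ s.getD 0 0
    · rw [if_pos hle, if_pos hle]
      have := loop_eq_fold u s (u.length + s.length) 1 0 (0, 0) (by omega) hdpos
      rw [hk00] at this; exact this
    · rw [if_neg hle, if_neg hle]
      have := loop_eq_fold u s (u.length + s.length) 0 1 (0, 0) (by omega) hdpos
      rw [hk00] at this; exact this

-- getD over a contiguous index range is the corresponding slice
theorem range'_getD (u : List Int) (i cnt : Nat) (h : i + cnt ≤ u.length) :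
    (List.range' i cnt).map (fun t => u.getD t 0) = (u.drop i).take cnt := by
  apply List.ext_getElem
  · simp [List.length_take, List.length_drop]; omega
  · intro t h1 h2
    simp only [List.getElem_map, List.getElem_range', List.getElem_take, List.getElem_drop]
    have ht : t < cnt := by simpa using h1
    rw [List.getD_eq_getElem u 0 (by omega)]
    congr 1
    omega

-- one run of A's path: the pairs compared against s[j] before j advances
theorem path_decomp (u s : List Int) (j : Nat) (hj : j < s.length) : ∀ fuel i,
    u.length - i ≤ fuel →
    pvPath u s i j = runPairs u s i j ++ pvPath u s (runEnd u (s.getD j 0) i) (j+1) := by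
  intro fuel
  induction fuel with
  | zero =>
      intro i h
      have hi : ¬ i < u.length := by omega
      have hre : runEnd u (s.getD j 0) i = i := by
        rw [runEnd, dif_neg (by omega)]
      rw [pvPath, dif_neg (by omega), hre, pvPath, dif_neg (by omega)]
      unfold runPairs
      rw [hre]
      have : min (i + 1) u.length - i = 0 := by omega
      simp [this]
  | succ fuel ih =>
      intro i h
      by_cases hi : i < u.length
      · rw [pvPath, dif_pos ⟨hi, hj⟩]
        by_cases hle : u.getD i 0 ≤ s.getD j 0
        · rw [if_pos hle]
          have hre : runEnd u (s.getD j 0) i = runEnd u (s.getD j 0) (i+1) := by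
            rw [runEnd, dif_pos ⟨hi, hle⟩]
          have hge : i + 1 ≤ runEnd u (s.getD j 0) (i+1) := runEnd_ge u _ (i+1)
          have hcons : runPairs u s i j = (i, j) :: runPairs u s (i+1) j := by
            unfold runPairs
            rw [hre]
            set k := runEnd u (s.getD j 0) (i+1)
            have hcnt : min (k + 1) u.length - i = (min (k + 1) u.length - (i+1)) + 1 := by
              omega
            rw [hcnt, List.range'_succ]
            simp
          rw [hcons, ih (i+1) (by omega), hre]
          simp
        · rw [if_neg hle]
          have hre : runEnd u (s.getD j 0) i = i := by
            rw [runEnd, dif_neg (fun hcon => hle hcon.2)]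
          have hone : runPairs u s i j = [(i, j)] := by
            unfold runPairs
            rw [hre]
            have : min (i + 1) u.length - i = 1 := by omega
            simp [this]
          rw [hone, hre]
          simp
      · have hre : runEnd u (s.getD j 0) i = i := by
          rw [runEnd, dif_neg (by omega)]
        rw [pvPath, dif_neg (by omega), hre, pvPath, dif_neg (by omega)]
        unfold runPairs
        rw [hre]
        have : min (i + 1) u.length - i = 0 := by omega
        simp [this]

-- the fold of one run absorbs into a single wStep with the run's min? candidate
theorem run_fold (sj : Int) (run : List Int) (v : Int)
    (hv : PySem.List.min? run (fun x => |x - sj|) = some v) (c : Int × Int) :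
    List.foldl wStep c (run.map (fun t => (t, sj))) = wStep c (v, sj) := by
  cases run with
  | nil => simp [PySem.List.min?] at hv
  | cons x xs =>
      rw [min?_cons_foldl] at hv
      simp only [List.map_cons]
      rw [foldl_wStep_cons, foldl_wStep_snd]
      congr 1
      rw [Option.some_inj.mp hv]

theorem take_drop_ne_nil (u : List Int) (i c : Nat) (h1 : 1 ≤ c) (h2 : i < u.length) :
    (u.drop i).take c ≠ [] := by
  intro hnil
  have hlen := congrArg List.length hnil
  simp only [List.length_take, List.length_drop, List.length_nil] at hlen
  rcases Nat.min_eq_zero_iff.mp hlen with h | h <;> omega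

-- the core bridge: the strict-'<' fold over A's path values equals it over B's candidates
theorem main_fold (u s : List Int) : ∀ fuel j i (c : Int × Int),
    s.length - j ≤ fuel →
    List.foldl wStep c ((pvPath u s i j).map (vp u s))
      = List.foldl wStep c (bCands u s i j) := by
  intro fuel
  induction fuel with
  | zero =>
      intro j i c h
      have hj : ¬ j < s.length := by omega
      rw [pvPath, dif_neg (by omega), bCands, dif_neg (by omega)]
      simp
  | succ fuel ih =>
      intro j i c h
      by_cases hj : j < s.length
      · by_cases hi : i < u.length
        · set sj := s.getD j 0 with hsj
          set k := runEnd u sj i with hk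
          have hki : i ≤ k := runEnd_ge u sj i
          have hkn : k ≤ u.length := runEnd_le u sj i (by omega)
          have hm1 : i + 1 ≤ min (k + 1) u.length := le_min (by omega) (by omega)
          have hm2 : min (k + 1) u.length ≤ u.length := min_le_right _ _
          have hrange : i + (min (k + 1) u.length - i) ≤ u.length := by omega
          have hrunvals : (runPairs u s i j).map (vp u s)
              = ((u.drop i).take (min (k + 1) u.length - i)).map (fun t => (t, sj)) := by
            unfold runPairs
            rw [← hsj, ← hk, ← range'_getD u i _ hrange]
            simp only [List.map_map]
            apply List.map_congr_left
            intro a _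
            rfl
          have hrun_ne : (u.drop i).take (min (k + 1) u.length - i) ≠ [] :=
            take_drop_ne_nil u i _ (by omega) hi
          obtain ⟨v, hv⟩ : ∃ v, PySem.List.min?
              ((u.drop i).take (min (k + 1) u.length - i)) (fun x => |x - sj|) = some v := by
            cases hmv : PySem.List.min?
                ((u.drop i).take (min (k + 1) u.length - i)) (fun x => |x - sj|) with
            | some v => exact ⟨v, rfl⟩
            | none => exact absurd ((PySem.List.min?_eq_none_iff _ _).mp hmv) hrun_ne
          rw [path_decomp u s j hj (u.length) i (by omega)]
          rw [List.map_append, List.foldl_append, hrunvals, run_fold sj _ v hv]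
          rw [bCands, dif_pos ⟨hi, hj⟩]
          simp only [← hsj, ← hk, hv]
          rw [List.foldl_cons]
          exact ih (j+1) k (wStep c (v, sj)) (by omega)
        · rw [pvPath, dif_neg (by omega), bCands, dif_neg (by omega)]
          simp
      · rw [pvPath, dif_neg (by omega), bCands, dif_neg (by omega)]
        simp

-- bLoop is bCands with an accumulator
theorem bLoop_eq (u s : List Int) : ∀ fuel j i acc,
    s.length - j ≤ fuel →
    bLoop u (s.drop j) i acc = acc ++ bCands u s i j := by
  intro fuel
  induction fuel with
  | zero =>
      intro j i acc h
      have hj : s.length ≤ j := by omega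
      rw [List.drop_eq_nil_of_le hj, bCands, dif_neg (by omega)]
      simp [bLoop]
  | succ fuel ih =>
      intro j i acc h
      by_cases hj : j < s.length
      · rw [List.drop_eq_getElem_cons hj]
        have hgd : s[j] = s.getD j 0 := (List.getD_eq_getElem s 0 hj).symm
        by_cases hi : i < u.length
        · set sj := s.getD j 0 with hsj
          set k := runEnd u sj i with hk
          have hki : i ≤ k := runEnd_ge u sj i
          have hkn : k ≤ u.length := runEnd_le u sj i (by omega)
          have hm1 : i + 1 ≤ min (k + 1) u.length := le_min (by omega) (by omega)
          have hslice : PySem.List.slice u (some (i : Int)) (some ((min (k+1) u.length : Nat) : Int))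
              = (u.drop i).take (min (k + 1) u.length - i) :=
            PySem.List.slice_natCast u i (min (k+1) u.length)
          have hrun_ne : (u.drop i).take (min (k + 1) u.length - i) ≠ [] :=
            take_drop_ne_nil u i _ (by omega) hi
          obtain ⟨v, hv⟩ : ∃ v, PySem.List.min?
              ((u.drop i).take (min (k + 1) u.length - i)) (fun x => |x - sj|) = some v := by
            cases hmv : PySem.List.min?
                ((u.drop i).take (min (k + 1) u.length - i)) (fun x => |x - sj|) with
            | some v => exact ⟨v, rfl⟩
            | none => exact absurd ((PySem.List.min?_eq_none_iff _ _).mp hmv) hrun_ne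
          have hbc : bCands u s i j = (v, sj) :: bCands u s k (j+1) := by
            rw [bCands, dif_pos ⟨hi, hj⟩]
            simp only [← hsj, ← hk, hv]
          rw [bLoop]
          simp only [hgd, ← hsj, ← hk, if_pos hi, hslice, hv]
          rw [ih (j+1) k (acc ++ [(v, sj)]) (by omega), hbc]
          simp
        · rw [bLoop]
          simp only [if_neg hi]
          rw [bCands, dif_neg (by omega)]
          simp
      · rw [List.drop_eq_nil_of_le (by omega), bCands, dif_neg (by omega)]
        simp [bLoop]

-- ===== VERDICT (by name: the statement is the Claim_ definition above) =====
theorem clothes_spec : Claim_equal_clothes := by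
  intro u s _hdom hpre
  obtain ⟨hu, hs⟩ := hpre
  have hul : 0 < u.length := List.length_pos_iff.mpr hu
  have hsl : 0 < s.length := List.length_pos_iff.mpr hs
  unfold Spec_clothes
  -- B's side: candidates, head candidate, min? as a fold
  have hcands : bLoop u s 0 [] = bCands u s 0 0 := by
    have := bLoop_eq u s s.length 0 0 [] (by omega)
    simpa using this
  -- head candidate of bCands 0 0
  set sj := s.getD 0 0 with hsj
  set k := runEnd u sj 0 with hk
  have hkn : k ≤ u.length := runEnd_le u sj 0 (by omega)
  have hm1 : 0 + 1 ≤ min (k + 1) u.length := le_min (by omega) (by omega)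
  obtain ⟨cnt, hcnt⟩ : ∃ c, min (k + 1) u.length - 0 = c := ⟨_, rfl⟩
  have hcnt1 : 1 ≤ cnt := by omega
  have hrun : (u.drop 0).take (min (k+1) u.length - 0) = u.take cnt := by
    rw [List.drop_zero, hcnt]
  have hrun_ne : u.take cnt ≠ [] := by
    have h0 := take_drop_ne_nil u 0 cnt hcnt1 hul
    rwa [List.drop_zero] at h0
  obtain ⟨v0, hv0⟩ : ∃ v, PySem.List.min? (u.take cnt) (fun x => |x - sj|) = some v := by
    cases hmv : PySem.List.min? (u.take cnt) (fun x => |x - sj|) with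
    | some v => exact ⟨v, rfl⟩
    | none => exact absurd ((PySem.List.min?_eq_none_iff _ _).mp hmv) hrun_ne
  have hbc : bCands u s 0 0 = (v0, sj) :: bCands u s k 1 := by
    rw [bCands, dif_pos ⟨hul, hsl⟩]
    simp only [← hsj, ← hk, hrun, hv0]
  -- x0 = value pair at (0,0); c0 = (v0, sj) is the first run's first-min, a fold from x0
  have hx0 : vp u s (0, 0) = (u.getD 0 0, sj) := rfl
  have hc0fold : (v0, sj) = List.foldl wStep (u.getD 0 0, sj)
      ((u.take cnt).tail.map (fun t => (t, sj))) := by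
    obtain ⟨a, tl, hu'⟩ : ∃ a tl, u = a :: tl := by
      cases u with
      | nil => exact absurd rfl hu
      | cons a tl => exact ⟨a, tl, rfl⟩
    obtain ⟨m, hm⟩ : ∃ m, cnt = m + 1 := ⟨cnt - 1, by omega⟩
    have htake : u.take cnt = a :: tl.take (cnt - 1) := by
      rw [hu', hm]
      simp
    have hgda : u.getD 0 0 = a := by rw [hu']; rfl
    rw [htake] at hv0
    rw [min?_cons_foldl] at hv0
    rw [htake, hgda]
    simp only [List.tail_cons]
    rw [foldl_wStep_snd]
    exact congrArg (fun t => (t, sj)) (Option.some_inj.mp hv0).symm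
  have habsorb : wStep (vp u s (0, 0)) (v0, sj) = (v0, sj) := by
    rw [hx0] at *
    rcases foldl_wStep_lt_or_eq ((u.take cnt).tail.map (fun t => (t, sj))) (u.getD 0 0, sj) with
      heq | hlt
    · rw [hc0fold, heq, wStep_self]
    · rw [← hc0fold] at hlt
      exact if_pos hlt
  -- assemble
  rw [A_char u s hu hs]
  unfold clothes_alt
  rw [hcands, hbc, min?_cons_foldl]
  show pvSel u s (List.foldl (pvStep u s) (0, 0) (pvPath u s 0 0))
      = wSel (List.foldl (fun b y => if wKey y < wKey b then y else b) (v0, sj) (bCands u s k 1))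
  have hsel : pvSel u s (List.foldl (pvStep u s) (0, 0) (pvPath u s 0 0))
      = wSel (vp u s (List.foldl (pvStep u s) (0, 0) (pvPath u s 0 0))) := rfl
  rw [hsel, vp_foldl]
  rw [main_fold u s s.length 0 0 (vp u s (0, 0)) (by omega)]
  rw [hbc, List.foldl_cons, habsorb]
  rfl
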